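-- pv_equiv track=rewrite | github.com/paiml/depyler | examples/hard_graph_patterns.py | count_odd_degree_nodes
-- ===== SOURCE A (Python) =====
-- def all_nodes(graph: dict[int, list[int]]) -> list[int]:
--     """Extract all unique nodes from a graph adjacency list."""
--     node_set: dict[int, int] = {}
--     for node in graph:
--         node_set[node] = 1
--         neighbors: list[int] = graph[node]
--         j: int = 0
--         while j < len(neighbors):
--             node_set[neighbors[j]] = 1
--             j = j + 1
--     result: list[int] = []
--     for n in node_set:
--         result.append(n)
--     return result
--
-- def make_undirected(graph: dict[int, list[int]]) -> dict[int, list[int]]: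
--     """Ensure graph has edges in both directions without duplicates."""
--     ug: dict[int, list[int]] = {}
--     edge_set: dict[int, dict[int, int]] = {}
--     for node in graph:
--         if node not in ug:
--             ug[node] = []
--         if node not in edge_set:
--             edge_set[node] = {}
--         neighbors: list[int] = graph[node]
--         k: int = 0
--         while k < len(neighbors):
--             nb: int = neighbors[k]
--             if nb not in ug:
--                 ug[nb] = []
--             if nb not in edge_set:
--                 edge_set[nb] = {}
--             if nb not in edge_set[node]:
--                 edge_set[node][nb] = 1
--                 ug[node].append(nb)
--             if node not in edge_set[nb]:
--                 edge_set[nb][node] = 1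
--                 ug[nb].append(node)
--             k = k + 1
--     return ug
--
-- def count_odd_degree_nodes(graph: dict[int, list[int]]) -> int:
--     """Count nodes with odd degree in undirected graph."""
--     ug: dict[int, list[int]] = make_undirected(graph)
--     nodes: list[int] = all_nodes(ug)
--     count: int = 0
--     ni: int = 0
--     while ni < len(nodes):
--         node: int = nodes[ni]
--         if node in ug and len(ug[node]) % 2 != 0:
--             count = count + 1
--         ni = ni + 1
--     return count
-- ===== SOURCE B (Python) =====
-- def count_odd_degree_nodes(graph: dict[int, list[int]]) -> int:
--     """Count nodes with odd degree in undirected graph."""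
--     edges = set()
--     for u, nbs in graph.items():
--         for v in nbs:
--             edges.add((u, v) if u <= v else (v, u))
--     deg = {}
--     for u, v in edges:
--         deg[u] = deg.get(u, 0) + 1
--         if u != v:
--             deg[v] = deg.get(v, 0) + 1
--     return sum(1 for d in deg.values() if d % 2 != 0)
-- ===== Notes on version B (the rewrite author's own statement) =====
-- stated objective: alternative
-- what changed: B never builds an adjacency structure: it canonicalizes every (u,v) occurrence into a sorted-pair edge set, then computes each node's degree by counting incident canonical edges (self-loops once) and counts the odd degrees, replacing A's make_undirected (ug plus edge_set dict-of-dicts), all_nodes and indexed counting loop.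
import Mathlib
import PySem

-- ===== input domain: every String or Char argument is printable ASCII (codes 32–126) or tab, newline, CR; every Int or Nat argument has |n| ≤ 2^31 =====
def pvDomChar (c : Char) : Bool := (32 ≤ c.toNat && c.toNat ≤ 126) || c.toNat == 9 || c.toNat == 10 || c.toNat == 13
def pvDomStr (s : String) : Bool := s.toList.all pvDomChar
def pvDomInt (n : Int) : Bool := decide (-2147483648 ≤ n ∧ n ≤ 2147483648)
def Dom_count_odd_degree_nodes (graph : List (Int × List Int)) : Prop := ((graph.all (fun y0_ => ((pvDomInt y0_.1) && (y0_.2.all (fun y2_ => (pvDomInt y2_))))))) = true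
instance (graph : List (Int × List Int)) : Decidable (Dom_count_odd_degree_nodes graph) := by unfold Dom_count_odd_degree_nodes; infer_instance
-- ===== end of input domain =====

-- B drops A's adjacency structures entirely: it collects the canonical (sorted-pair) edge set,
-- computes degrees by counting incident canonical edges, and counts the odd ones; objective: alternative.

-- ===== PORT A =====
-- all_nodes: 'for node in graph: … graph[node]' is ported as a fold over the items list
-- (exact: dict keys are unique, so graph[node] is the item's own value).
def all_nodes (g : PySem.Dict Int (List Int)) : List Int :=
  (g.items.foldl (fun ns (p : Int × List Int) =>
      -- node_set[node] = 1, then the while-j loop over neighbors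
      p.2.foldl (fun ns nb => ns.insert nb 1) (ns.insert p.1 1))
    (PySem.Dict.empty : PySem.Dict Int Int)).keys

-- one iteration of make_undirected's inner while-k loop (node fixed, nb the current neighbor)
def mu_inner (node : Int) (st : PySem.Dict Int (List Int) × PySem.Dict Int (PySem.Dict Int Int))
    (nb : Int) : PySem.Dict Int (List Int) × PySem.Dict Int (PySem.Dict Int Int) :=
  let ug := if st.1.contains nb then st.1 else st.1.insert nb []
  let es := if st.2.contains nb then st.2 else st.2.insert nb PySem.Dict.empty
  let st2 :=
    if (es.getD node PySem.Dict.empty).contains nb then (ug, es)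
    else (ug.modify node [] (fun l => l ++ [nb]), es.modify node PySem.Dict.empty (fun d => d.insert nb 1))
  if (st2.2.getD nb PySem.Dict.empty).contains node then st2
  else (st2.1.modify nb [] (fun l => l ++ [node]), st2.2.modify nb PySem.Dict.empty (fun d => d.insert node 1))

-- one iteration of make_undirected's outer 'for node in graph' loop
def mu_outer (st : PySem.Dict Int (List Int) × PySem.Dict Int (PySem.Dict Int Int))
    (p : Int × List Int) : PySem.Dict Int (List Int) × PySem.Dict Int (PySem.Dict Int Int) :=
  let ug := if st.1.contains p.1 then st.1 else st.1.insert p.1 []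
  let es := if st.2.contains p.1 then st.2 else st.2.insert p.1 PySem.Dict.empty
  p.2.foldl (mu_inner p.1) (ug, es)

def make_undirected (graph : List (Int × List Int)) : PySem.Dict Int (List Int) :=
  (graph.foldl mu_outer
    ((PySem.Dict.empty : PySem.Dict Int (List Int)), (PySem.Dict.empty : PySem.Dict Int (PySem.Dict Int Int)))).1

def count_odd_degree_nodes (graph : List (Int × List Int)) : Int :=
  let ug := make_undirected graph
  let nodes := all_nodes ug
  nodes.foldl (fun c node =>
    if ug.contains node && (ug.getD node []).length % 2 != 0 then c + 1 else c) 0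

-- ===== PORT B =====
-- '(u, v) if u <= v else (v, u)': the canonical form of one edge
def canon (u v : Int) : Int × Int := if u ≤ v then (u, v) else (v, u)

-- body of B's first loop: 'for v in nbs: edges.add(canon)'
def edges_outer (es : PySem.Set (Int × Int)) (p : Int × List Int) : PySem.Set (Int × Int) :=
  p.2.foldl (fun es v => PySem.Set.add es (canon p.1 v)) es

-- body of B's second loop: 'deg[u] = deg.get(u, 0) + 1; if u != v: deg[v] = deg.get(v, 0) + 1'
def deg_step (deg : PySem.Dict Int Int) (e : Int × Int) : PySem.Dict Int Int :=
  let deg := deg.insert e.1 (deg.getD e.1 0 + 1)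
  if e.1 != e.2 then deg.insert e.2 (deg.getD e.2 0 + 1) else deg

def count_odd_degree_nodes_alt (graph : List (Int × List Int)) : Int :=
  let edges := graph.foldl edges_outer (PySem.Set.empty : PySem.Set (Int × Int))
  let deg := edges.foldl deg_step (PySem.Dict.empty : PySem.Dict Int Int)
  deg.values.foldl (fun c d => if d % 2 != 0 then c + 1 else c) 0

-- ===== PRECONDITION & SPEC =====
def Spec_count_odd_degree_nodes (graph : List (Int × List Int)) (out : Int) : Prop := out = count_odd_degree_nodes_alt graph
instance (graph : List (Int × List Int)) (out : Int) : Decidable (Spec_count_odd_degree_nodes graph out) := by unfold Spec_count_odd_degree_nodes; infer_instance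

-- ===== CLAIM (what is proved, stated in full; the proofs are below) =====
def Claim_equal_count_odd_degree_nodes : Prop := ∀ (graph : List (Int × List Int)), Dom_count_odd_degree_nodes graph → Spec_count_odd_degree_nodes graph (count_odd_degree_nodes graph)

-- ===== LEMMAS AND PROOFS =====

-- PROOF-ONLY adjacency construction (an intermediate between A's ug and B's edge set):
-- one neighbor-set step and one row step of a fused node → neighbor-set dict
def adj_step (node : Int) (adj : PySem.Dict Int (PySem.Set Int)) (nb : Int) : PySem.Dict Int (PySem.Set Int) :=
  let adj := adj.setdefault nb PySem.Set.empty
  let adj := adj.modify node PySem.Set.empty (fun s => PySem.Set.add s nb)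
  adj.modify nb PySem.Set.empty (fun s => PySem.Set.add s node)

def adj_outer (adj : PySem.Dict Int (PySem.Set Int)) (p : Int × List Int) : PySem.Dict Int (PySem.Set Int) :=
  p.2.foldl (adj_step p.1) (adj.setdefault p.1 PySem.Set.empty)

-- invariant tying A's parallel (ug, edge_set) state together: keys are unique and shared,
-- edge_set[k]'s key list IS ug[k]'s adjacency list, and every listed neighbor is itself a key
def InvA (ug : PySem.Dict Int (List Int)) (es : PySem.Dict Int (PySem.Dict Int Int)) : Prop :=
  ug.keys.Nodup ∧ es.keys = ug.keys ∧
  (∀ k : Int, (es.getD k PySem.Dict.empty).keys = ug.getD k []) ∧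
  (∀ k x : Int, x ∈ ug.getD k [] → x ∈ ug.keys)

theorem insert_getD_self_of_contains {ν : Type} (d : PySem.Dict Int ν) (k : Int) (d0 : ν)
    (hc : d.contains k = true) (hn : d.keys.Nodup) : d.insert k (d.getD k d0) = d := by
  apply PySem.Dict.ext
  rw [PySem.Dict.items_insert_of_contains _ _ hc]
  have : ∀ p ∈ d.items, (if (p.1 == k) then (k, d.getD k d0) else p) = id p := by
    intro p hp
    by_cases hk : p.1 = k
    · subst hk
      have : d.getD p.1 d0 = p.2 := PySem.Dict.getD_of_mem_items d (by simpa using hp) hn d0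
      simp [this]
    · simp [hk]
  rw [List.map_congr_left this, List.map_id]

theorem setdefault_eq {ν : Type} (d : PySem.Dict Int ν) (k : Int) (v : ν) :
    d.setdefault k v = if d.contains k then d else d.insert k v := by
  by_cases h : d.contains k = true <;> simp [PySem.Dict.setdefault, PySem.Dict.insert, h]

-- setdefault with the default value never changes a getD-at-default lookup
theorem getD_setdefault_same {ν : Type} (d : PySem.Dict Int ν) (k a : Int) (v : ν) :
    (d.setdefault k v).getD a v = d.getD a v := by
  rw [setdefault_eq]
  by_cases hc : d.contains k = true
  · rw [if_pos hc]
  · rw [if_neg hc, PySem.Dict.getD_insert]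
    by_cases hak : a = k
    · subst hak
      rw [if_pos rfl, PySem.Dict.getD_of_not_contains d v (Bool.eq_false_iff.mpr hc)]
    · rw [if_neg hak]

-- one symmetric half of A's inner-loop body, against the proof-adjacency's Set.add via modify
theorem phase_step (a b : Int) (ug : PySem.Dict Int (List Int)) (es : PySem.Dict Int (PySem.Dict Int Int))
    (h : InvA ug es) (ha : a ∈ ug.keys) (hb : b ∈ ug.keys) :
    (if ((es.getD a PySem.Dict.empty).contains b) then (ug, es)
      else (ug.modify a [] (fun l => l ++ [b]), es.modify a PySem.Dict.empty (fun d => d.insert b 1))).1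
        = ug.modify a PySem.Set.empty (fun s => PySem.Set.add s b) ∧
    InvA (if ((es.getD a PySem.Dict.empty).contains b) then (ug, es)
      else (ug.modify a [] (fun l => l ++ [b]), es.modify a PySem.Dict.empty (fun d => d.insert b 1))).1
        ((if ((es.getD a PySem.Dict.empty).contains b) then (ug, es)
      else (ug.modify a [] (fun l => l ++ [b]), es.modify a PySem.Dict.empty (fun d => d.insert b 1))).2) ∧
    (if ((es.getD a PySem.Dict.empty).contains b) then (ug, es)
      else (ug.modify a [] (fun l => l ++ [b]), es.modify a PySem.Dict.empty (fun d => d.insert b 1))).1.keys = ug.keys := by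
  obtain ⟨hn, hke, hg, hcl⟩ := h
  have hca : ug.contains a = true := (PySem.Dict.contains_iff_mem_keys ug a).mpr ha
  have hcea : es.contains a = true := (PySem.Dict.contains_iff_mem_keys es a).mpr (hke ▸ ha)
  have hcond : ((es.getD a PySem.Dict.empty).contains b = true) ↔ b ∈ ug.getD a [] := by
    rw [PySem.Dict.contains_iff_mem_keys, hg a]
  by_cases hc : (es.getD a PySem.Dict.empty).contains b = true
  · have hmem : b ∈ ug.getD a [] := hcond.mp hc
    have hadd : PySem.Set.add (ug.getD a PySem.Set.empty) b = ug.getD a PySem.Set.empty := by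
      simp [PySem.Set.add]
      exact hmem
    refine ⟨?_, by simp only [hc, if_true]; exact ⟨hn, hke, hg, hcl⟩, by simp [hc]⟩
    simp only [hc, if_true]
    rw [PySem.Dict.modify, hadd, insert_getD_self_of_contains ug a _ hca hn]
  · have hnmem : b ∉ ug.getD a [] := fun hm => hc (hcond.mpr hm)
    have hadd : PySem.Set.add (ug.getD a PySem.Set.empty) b = ug.getD a PySem.Set.empty ++ [b] := by
      simp [PySem.Set.add]
      exact hnmem
    have hcf : (es.getD a PySem.Dict.empty).contains b = false := Bool.eq_false_iff.mpr hc
    simp only [hcf, Bool.false_eq_true, if_false, PySem.Dict.modify, hadd]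
    refine ⟨rfl, ?_, ?_⟩
    · refine ⟨?_, ?_, ?_, ?_⟩
      · rw [PySem.Dict.keys_insert_of_contains _ _ hca]; exact hn
      · rw [PySem.Dict.keys_insert_of_contains _ _ hcea, PySem.Dict.keys_insert_of_contains _ _ hca, hke]
      · intro k
        rw [PySem.Dict.getD_insert, PySem.Dict.getD_insert]
        by_cases hk : k = a
        · simp only [hk, if_true]
          rw [PySem.Dict.keys_insert_of_not_contains _ _ hcf, hg a]
        · simp [hk, hg k]
      · intro k x hx
        rw [PySem.Dict.keys_insert_of_contains _ _ hca]
        rw [PySem.Dict.getD_insert] at hx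
        by_cases hk : k = a
        · rw [if_pos hk] at hx
          rcases List.mem_append.mp hx with h1 | h2
          · exact hcl a x h1
          · simp at h2; subst h2; exact hb
        · rw [if_neg hk] at hx; exact hcl k x hx
    · rw [PySem.Dict.keys_insert_of_contains _ _ hca]

-- both symmetric halves of A's inner-loop body at once
theorem inner_core (node nb : Int) (ug : PySem.Dict Int (List Int)) (es : PySem.Dict Int (PySem.Dict Int Int))
    (h : InvA ug es) (hnode : node ∈ ug.keys) (hnb : nb ∈ ug.keys) :
    ((fun st2 => if ((st2.2.getD nb PySem.Dict.empty).contains node) then st2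
        else (st2.1.modify nb [] (fun l => l ++ [node]), st2.2.modify nb PySem.Dict.empty (fun d => d.insert node 1)))
      (if ((es.getD node PySem.Dict.empty).contains nb) then (ug, es)
        else (ug.modify node [] (fun l => l ++ [nb]), es.modify node PySem.Dict.empty (fun d => d.insert nb 1)))).1
      = (ug.modify node PySem.Set.empty (fun s => PySem.Set.add s nb)).modify nb PySem.Set.empty (fun s => PySem.Set.add s node) ∧
    InvA ((fun st2 => if ((st2.2.getD nb PySem.Dict.empty).contains node) then st2
        else (st2.1.modify nb [] (fun l => l ++ [node]), st2.2.modify nb PySem.Dict.empty (fun d => d.insert node 1)))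
      (if ((es.getD node PySem.Dict.empty).contains nb) then (ug, es)
        else (ug.modify node [] (fun l => l ++ [nb]), es.modify node PySem.Dict.empty (fun d => d.insert nb 1)))).1
      ((fun st2 => if ((st2.2.getD nb PySem.Dict.empty).contains node) then st2
        else (st2.1.modify nb [] (fun l => l ++ [node]), st2.2.modify nb PySem.Dict.empty (fun d => d.insert node 1)))
      (if ((es.getD node PySem.Dict.empty).contains nb) then (ug, es)
        else (ug.modify node [] (fun l => l ++ [nb]), es.modify node PySem.Dict.empty (fun d => d.insert nb 1)))).2 ∧
    ((fun st2 => if ((st2.2.getD nb PySem.Dict.empty).contains node) then st2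
        else (st2.1.modify nb [] (fun l => l ++ [node]), st2.2.modify nb PySem.Dict.empty (fun d => d.insert node 1)))
      (if ((es.getD node PySem.Dict.empty).contains nb) then (ug, es)
        else (ug.modify node [] (fun l => l ++ [nb]), es.modify node PySem.Dict.empty (fun d => d.insert nb 1)))).1.keys
      = ug.keys := by
  obtain ⟨h1eq, h1inv, h1k⟩ := phase_step node nb ug es h hnode hnb
  set P1 := (if ((es.getD node PySem.Dict.empty).contains nb) then (ug, es)
      else (ug.modify node [] (fun l => l ++ [nb]), es.modify node PySem.Dict.empty (fun d => d.insert nb 1))) with hP1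
  obtain ⟨h2eq, h2inv, h2k⟩ := phase_step nb node P1.1 P1.2 h1inv (h1k ▸ hnb) (h1k ▸ hnode)
  rw [Prod.mk.eta] at h2eq h2inv h2k
  refine ⟨?_, h2inv, ?_⟩
  · rw [h2eq, h1eq]
  · rw [h2k, h1k]

-- the two 'if x not in …' setdefault blocks of A, against the proof-adjacency's setdefault
theorem sd_step (x : Int) (ug : PySem.Dict Int (List Int)) (es : PySem.Dict Int (PySem.Dict Int Int))
    (h : InvA ug es) :
    InvA (if ug.contains x then ug else ug.insert x [])
         (if es.contains x then es else es.insert x PySem.Dict.empty) ∧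
    (if ug.contains x then ug else ug.insert x []) = ug.setdefault x PySem.Set.empty ∧
    x ∈ (if ug.contains x then ug else ug.insert x []).keys ∧
    (∀ y : Int, y ∈ ug.keys → y ∈ (if ug.contains x then ug else ug.insert x []).keys) := by
  obtain ⟨hn, hke, hg, hcl⟩ := h
  have hce : es.contains x = ug.contains x := by
    rw [PySem.Dict.contains_eq_decide_mem_keys, PySem.Dict.contains_eq_decide_mem_keys, hke]
  by_cases hx : ug.contains x = true
  · have hcex : es.contains x = true := by rw [hce]; exact hx
    rw [if_pos hx, if_pos hcex, setdefault_eq, if_pos hx]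
    exact ⟨⟨hn, hke, hg, hcl⟩, rfl, (PySem.Dict.contains_iff_mem_keys ug x).mp hx, fun y hy => hy⟩
  · have hxf : ug.contains x = false := Bool.eq_false_iff.mpr hx
    have hxm : x ∉ ug.keys := fun hm => hx ((PySem.Dict.contains_iff_mem_keys ug x).mpr hm)
    simp only [hxf, hce, Bool.false_eq_true, if_false, setdefault_eq]
    refine ⟨⟨?_, ?_, ?_, ?_⟩, rfl, ?_, ?_⟩
    · rw [PySem.Dict.keys_insert_of_not_contains _ _ hxf]
      have hdis : ∀ a ∈ ug.keys, ¬ a = x := fun a ha h => hxm (h ▸ ha)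
      simpa [List.nodup_append] using ⟨hn, hdis⟩
    · rw [PySem.Dict.keys_insert_of_not_contains _ _ hxf,
          PySem.Dict.keys_insert_of_not_contains _ _ (by rw [hce]; exact hxf), hke]
    · intro k
      rw [PySem.Dict.getD_insert, PySem.Dict.getD_insert]
      by_cases hk : k = x
      · simp only [hk, if_true]
        simp [PySem.Dict.keys, PySem.Dict.empty]
      · simp [hk, hg k]
    · intro k y hy
      rw [PySem.Dict.getD_insert] at hy
      rw [PySem.Dict.keys_insert_of_not_contains _ _ hxf]
      by_cases hk : k = x
      · rw [if_pos hk] at hy; simp at hy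
      · rw [if_neg hk] at hy
        exact List.mem_append.mpr (Or.inl (hcl k y hy))
    · rw [PySem.Dict.keys_insert_of_not_contains _ _ hxf]; simp
    · intro y hy
      rw [PySem.Dict.keys_insert_of_not_contains _ _ hxf]
      exact List.mem_append.mpr (Or.inl hy)

theorem inner_step (node nb : Int) (ug : PySem.Dict Int (List Int)) (es : PySem.Dict Int (PySem.Dict Int Int))
    (h : InvA ug es) (hnode : node ∈ ug.keys) :
    InvA (mu_inner node (ug, es) nb).1 (mu_inner node (ug, es) nb).2 ∧
    (mu_inner node (ug, es) nb).1 = adj_step node ug nb ∧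
    (∀ y : Int, y ∈ ug.keys → y ∈ (mu_inner node (ug, es) nb).1.keys) := by
  obtain ⟨hi1, he1, hx1, hmono1⟩ := sd_step nb ug es h
  obtain ⟨hceq, hinv, hk⟩ := inner_core node nb _ _ hi1 (hmono1 node hnode) hx1
  simp only [mu_inner, adj_step]
  refine ⟨hinv, ?_, fun y hy => hk ▸ hmono1 y hy⟩
  rw [hceq, he1]

theorem inner_fold (node : Int) (nbs : List Int) (ug : PySem.Dict Int (List Int)) (es : PySem.Dict Int (PySem.Dict Int Int))
    (h : InvA ug es) (hnode : node ∈ ug.keys) :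
    InvA (nbs.foldl (mu_inner node) (ug, es)).1 (nbs.foldl (mu_inner node) (ug, es)).2 ∧
    (nbs.foldl (mu_inner node) (ug, es)).1 = nbs.foldl (adj_step node) ug ∧
    (∀ y : Int, y ∈ ug.keys → y ∈ (nbs.foldl (mu_inner node) (ug, es)).1.keys) := by
  induction nbs generalizing ug es with
  | nil => exact ⟨h, rfl, fun y hy => hy⟩
  | cons nb nbs ih =>
    obtain ⟨hinv, heq, hmono⟩ := inner_step node nb ug es h hnode
    obtain ⟨ih1, ih2, ih3⟩ := ih (mu_inner node (ug, es) nb).1 (mu_inner node (ug, es) nb).2 hinv (hmono node hnode)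
    rw [Prod.mk.eta] at ih1 ih2 ih3
    simp only [List.foldl_cons]
    exact ⟨ih1, by rw [ih2, heq], fun y hy => ih3 y (hmono y hy)⟩

theorem outer_fold (graph : List (Int × List Int)) (ug : PySem.Dict Int (List Int)) (es : PySem.Dict Int (PySem.Dict Int Int))
    (h : InvA ug es) :
    InvA (graph.foldl mu_outer (ug, es)).1 (graph.foldl mu_outer (ug, es)).2 ∧
    (graph.foldl mu_outer (ug, es)).1 = graph.foldl adj_outer ug := by
  induction graph generalizing ug es with
  | nil => exact ⟨h, rfl⟩
  | cons p graph ih =>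
    obtain ⟨hi1, he1, hx1, _⟩ := sd_step p.1 ug es h
    obtain ⟨hinv, heq, _⟩ := inner_fold p.1 p.2 _ _ hi1 hx1
    obtain ⟨ih1, ih2⟩ := ih (mu_outer (ug, es) p).1 (mu_outer (ug, es) p).2 (by simpa only [mu_outer] using hinv)
    rw [Prod.mk.eta] at ih1 ih2
    simp only [List.foldl_cons]
    refine ⟨ih1, ?_⟩
    rw [ih2]
    simp only [mu_outer, adj_outer]
    rw [heq, he1]

-- keys of all_nodes' node_set accumulator: membership
theorem node_set_mem (l : List (Int × List Int)) (d : PySem.Dict Int Int) (k : Int) :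
    (k ∈ (l.foldl (fun ns (p : Int × List Int) =>
        p.2.foldl (fun ns nb => ns.insert nb 1) (ns.insert p.1 1)) d).keys) ↔
      (k ∈ d.keys ∨ ∃ p ∈ l, k = p.1 ∨ k ∈ p.2) := by
  induction l generalizing d with
  | nil => simp
  | cons p l ih =>
    simp only [List.foldl_cons]
    rw [ih]
    rw [PySem.Dict.keys_foldl_insert p.2 (fun _ _ => (1 : Int)) (d.insert p.1 1)]
    rw [PySem.Set.mem_update]
    rw [PySem.Dict.mem_keys_insert]
    simp only [List.mem_cons]
    constructor
    · rintro (((hk | hd) | hp2) | ⟨q, hq, hkq⟩)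
      · exact Or.inr ⟨p, Or.inl rfl, Or.inl hk⟩
      · exact Or.inl hd
      · exact Or.inr ⟨p, Or.inl rfl, Or.inr hp2⟩
      · exact Or.inr ⟨q, Or.inr hq, hkq⟩
    · rintro (hd | ⟨q, (rfl | hq), hkq⟩)
      · exact Or.inl (Or.inl (Or.inr hd))
      · rcases hkq with hk | hk
        · exact Or.inl (Or.inl (Or.inl hk))
        · exact Or.inl (Or.inr hk)
      · exact Or.inr ⟨q, hq, hkq⟩

theorem node_set_nodup (l : List (Int × List Int)) (d : PySem.Dict Int Int) (hn : d.keys.Nodup) :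
    (l.foldl (fun ns (p : Int × List Int) =>
        p.2.foldl (fun ns nb => ns.insert nb 1) (ns.insert p.1 1)) d).keys.Nodup := by
  induction l generalizing d with
  | nil => exact hn
  | cons p l ih =>
    simp only [List.foldl_cons]
    exact ih _ (PySem.Dict.nodup_keys_foldl_insert p.2 (fun _ _ => (1 : Int)) _
      (PySem.Dict.nodup_keys_insert _ _ _ hn))

theorem all_nodes_perm (ug : PySem.Dict Int (List Int)) (hn : ug.keys.Nodup)
    (hc : ∀ k x : Int, x ∈ ug.getD k [] → x ∈ ug.keys) :
    (all_nodes ug).Perm ug.keys := by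
  have hnodup : (all_nodes ug).Nodup := by
    unfold all_nodes
    exact node_set_nodup _ _ (by simp [PySem.Dict.empty, PySem.Dict.keys])
  rw [List.perm_ext_iff_of_nodup hnodup hn]
  intro a
  unfold all_nodes
  rw [node_set_mem]
  simp only [PySem.Dict.empty, PySem.Dict.keys, List.map_nil, List.not_mem_nil, false_or]
  constructor
  · rintro ⟨p, hp, rfl | ha⟩
    · exact PySem.Dict.mem_keys_of_mem_items ug hp
    · refine hc p.1 a ?_
      have : ug.getD p.1 [] = p.2 := PySem.Dict.getD_of_mem_items ug (by simpa using hp) hn []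
      rw [this]; exact ha
  · intro ha
    rcases List.mem_map.mp ha with ⟨p, hp, rfl⟩
    exact ⟨p, hp, Or.inl rfl⟩

-- A's counting loop over all_nodes = a countP over ug's key list
theorem count_eq (ug : PySem.Dict Int (List Int)) (hn : ug.keys.Nodup)
    (hc : ∀ k x : Int, x ∈ ug.getD k [] → x ∈ ug.keys) :
    (all_nodes ug).foldl (fun c node =>
        if ug.contains node && (ug.getD node []).length % 2 != 0 then c + 1 else c) (0 : Int)
      = ((ug.keys.countP (fun node => (ug.getD node []).length % 2 != 0) : Nat) : Int) := by
  rw [PySem.List.foldl_count_if, zero_add]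
  congr 1
  calc List.countP (fun node => ug.contains node && (ug.getD node []).length % 2 != 0) (all_nodes ug)
      = List.countP (fun node => ug.contains node && (ug.getD node []).length % 2 != 0) ug.keys :=
        (all_nodes_perm ug hn hc).countP_eq _
    _ = List.countP (fun node => (ug.getD node []).length % 2 != 0) ug.keys := by
        apply List.countP_congr
        intro a ha
        rw [(PySem.Dict.contains_iff_mem_keys ug a).mpr ha, Bool.true_and]

-- ---------- canonical-pair facts ----------
theorem canon_minmax (a b : Int) : canon a b = (min a b, max a b) := by
  unfold canon
  split_ifs with h
  · rw [min_eq_left h, max_eq_right h]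
  · have h' : b ≤ a := le_of_not_ge h
    rw [min_eq_right h', max_eq_left h']

theorem canon_inj (v : Int) : Function.Injective (fun b => canon v b) := by
  intro b b' h
  simp only [canon_minmax, Prod.mk.injEq] at h
  omega

theorem canon_eq_iff (a b c d : Int) :
    canon a b = canon c d ↔ (a = c ∧ b = d) ∨ (a = d ∧ b = c) := by
  rw [canon_minmax, canon_minmax, Prod.mk.injEq]
  constructor <;> intro h <;> omega

-- ---------- B's edge set: membership and nodup ----------
theorem mem_edges (g : List (Int × List Int)) (s : PySem.Set (Int × Int)) (x : Int × Int) :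
    x ∈ g.foldl edges_outer s ↔ x ∈ s ∨ ∃ p ∈ g, ∃ b ∈ p.2, x = canon p.1 b := by
  induction g generalizing s with
  | nil => simp
  | cons q g ih =>
    simp only [List.foldl_cons]
    rw [ih, edges_outer, PySem.Set.mem_foldl_add]
    simp only [List.mem_cons]
    constructor
    · rintro ((hs | ⟨b, hb, rfl⟩) | ⟨p, hp, hx⟩)
      · exact Or.inl hs
      · exact Or.inr ⟨q, Or.inl rfl, b, hb, rfl⟩
      · exact Or.inr ⟨p, Or.inr hp, hx⟩
    · rintro (hs | ⟨p, (rfl | hp), b, hb, rfl⟩)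
      · exact Or.inl (Or.inl hs)
      · exact Or.inl (Or.inr ⟨b, hb, rfl⟩)
      · exact Or.inr ⟨p, hp, b, hb, rfl⟩

theorem nodup_edges (g : List (Int × List Int)) (s : PySem.Set (Int × Int)) (h : s.Nodup) :
    (g.foldl edges_outer s).Nodup := by
  induction g generalizing s with
  | nil => exact h
  | cons q g ih =>
    simp only [List.foldl_cons]
    refine ih _ ?_
    rw [edges_outer, ← PySem.Set.update_map_eq_foldl_add]
    exact PySem.Set.nodup_update _ _ h

-- ---------- proof-adjacency: membership and nodup of the neighbor sets ----------
theorem adj_step_mem (u nb : Int) (d : PySem.Dict Int (PySem.Set Int)) (a b : Int) :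
    (b ∈ (adj_step u d nb).getD a PySem.Set.empty) ↔
      b ∈ d.getD a PySem.Set.empty ∨ (a = u ∧ b = nb) ∨ (a = nb ∧ b = u) := by
  unfold adj_step
  rw [PySem.Dict.getD_modify]
  by_cases hanb : a = nb
  · subst hanb
    rw [if_pos rfl, PySem.Set.mem_add, PySem.Dict.getD_modify]
    by_cases hau : a = u
    · subst hau
      rw [if_pos rfl, PySem.Set.mem_add, getD_setdefault_same]
      tauto
    · rw [if_neg hau, getD_setdefault_same]
      tauto
  · rw [if_neg hanb, PySem.Dict.getD_modify]
    by_cases hau : a = u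
    · subst hau
      rw [if_pos rfl, PySem.Set.mem_add, getD_setdefault_same]
      tauto
    · rw [if_neg hau, getD_setdefault_same]
      tauto

theorem adj_inner_mem (u : Int) (nbs : List Int) (d : PySem.Dict Int (PySem.Set Int)) (a b : Int) :
    (b ∈ (nbs.foldl (adj_step u) d).getD a PySem.Set.empty) ↔
      b ∈ d.getD a PySem.Set.empty ∨ (a = u ∧ b ∈ nbs) ∨ (b = u ∧ a ∈ nbs) := by
  induction nbs generalizing d with
  | nil => simp
  | cons nb nbs ih =>
    simp only [List.foldl_cons]
    rw [ih, adj_step_mem]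
    simp only [List.mem_cons]
    constructor
    · rintro ((hd | ⟨rfl, rfl⟩ | ⟨rfl, rfl⟩) | h) <;> tauto
    · rintro (hd | ⟨rfl, (rfl | hb)⟩ | ⟨rfl, (rfl | ha)⟩) <;> tauto

theorem adj_mem (g : List (Int × List Int)) (d : PySem.Dict Int (PySem.Set Int)) (a b : Int) :
    (b ∈ (g.foldl adj_outer d).getD a PySem.Set.empty) ↔
      b ∈ d.getD a PySem.Set.empty ∨ ∃ p ∈ g, (a = p.1 ∧ b ∈ p.2) ∨ (b = p.1 ∧ a ∈ p.2) := by
  induction g generalizing d with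
  | nil => simp
  | cons q g ih =>
    simp only [List.foldl_cons]
    rw [ih]
    simp only [adj_outer, adj_inner_mem, getD_setdefault_same, List.mem_cons]
    constructor
    · rintro ((hd | h) | ⟨p, hp, h⟩)
      · exact Or.inl hd
      · exact Or.inr ⟨q, Or.inl rfl, h⟩
      · exact Or.inr ⟨p, Or.inr hp, h⟩
    · rintro (hd | ⟨p, (rfl | hp), h⟩)
      · exact Or.inl (Or.inl hd)
      · exact Or.inl (Or.inr h)
      · exact Or.inr ⟨p, hp, h⟩

theorem adj_step_nodup (u nb : Int) (d : PySem.Dict Int (PySem.Set Int))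
    (h : ∀ x : Int, (d.getD x PySem.Set.empty).Nodup) :
    ∀ x : Int, ((adj_step u d nb).getD x PySem.Set.empty).Nodup := by
  intro x
  unfold adj_step
  rw [PySem.Dict.getD_modify]
  by_cases hx : x = nb
  · subst hx
    rw [if_pos rfl, PySem.Dict.getD_modify]
    by_cases hu : x = u
    · subst hu
      rw [if_pos rfl, getD_setdefault_same]
      exact PySem.Set.nodup_add _ _ (PySem.Set.nodup_add _ _ (h x))
    · rw [if_neg hu, getD_setdefault_same]
      exact PySem.Set.nodup_add _ _ (h x)
  · rw [if_neg hx, PySem.Dict.getD_modify]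
    by_cases hu : x = u
    · subst hu
      rw [if_pos rfl, getD_setdefault_same]
      exact PySem.Set.nodup_add _ _ (h x)
    · rw [if_neg hu, getD_setdefault_same]
      exact h x

theorem adj_inner_nodup (u : Int) (nbs : List Int) (d : PySem.Dict Int (PySem.Set Int))
    (h : ∀ x : Int, (d.getD x PySem.Set.empty).Nodup) :
    ∀ x : Int, ((nbs.foldl (adj_step u) d).getD x PySem.Set.empty).Nodup := by
  induction nbs generalizing d with
  | nil => exact h
  | cons nb nbs ih =>
    simp only [List.foldl_cons]
    exact ih _ (adj_step_nodup u nb d h)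

theorem adj_nodup (g : List (Int × List Int)) (d : PySem.Dict Int (PySem.Set Int))
    (h : ∀ x : Int, (d.getD x PySem.Set.empty).Nodup) :
    ∀ x : Int, ((g.foldl adj_outer d).getD x PySem.Set.empty).Nodup := by
  induction g generalizing d with
  | nil => exact h
  | cons q g ih =>
    simp only [List.foldl_cons]
    refine ih _ ?_
    simp only [adj_outer]
    exact adj_inner_nodup q.1 q.2 _ (fun x => by rw [getD_setdefault_same]; exact h x)

-- ---------- B's degree dict ----------
theorem deg_step_getD (d : PySem.Dict Int Int) (e : Int × Int) (v : Int) :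
    (deg_step d e).getD v 0 = d.getD v 0 + (if e.1 = v ∨ e.2 = v then 1 else 0) := by
  unfold deg_step
  by_cases h12 : e.1 = e.2
  · have hb : (e.1 != e.2) = false := by simp [h12]
    rw [hb]
    simp only [Bool.false_eq_true, if_false, PySem.Dict.getD_insert]
    by_cases hv : v = e.1
    · subst hv; simp
    · rw [if_neg hv, if_neg]
      · ring
      · rintro (h | h)
        · exact hv h.symm
        · exact hv (h12 ▸ h).symm
  · have hb : (e.1 != e.2) = true := by simp [h12]
    rw [hb]
    simp only [if_true, PySem.Dict.getD_insert]
    by_cases hv : v = e.2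
    · subst hv
      rw [if_pos rfl, if_neg (fun h : e.2 = e.1 => h12 h.symm), if_pos (Or.inr rfl)]
    · rw [if_neg hv]
      by_cases hv1 : v = e.1
      · subst hv1
        rw [if_pos rfl, if_pos (Or.inl rfl)]
      · rw [if_neg hv1, if_neg]
        · ring
        · rintro (h | h)
          · exact hv1 h.symm
          · exact hv h.symm

theorem deg_fold_getD (l : List (Int × Int)) (d : PySem.Dict Int Int) (v : Int) :
    (l.foldl deg_step d).getD v 0
      = d.getD v 0 + ((l.countP (fun e => decide (e.1 = v ∨ e.2 = v)) : Nat) : Int) := by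
  induction l generalizing d with
  | nil => simp
  | cons e l ih =>
    simp only [List.foldl_cons, List.countP_cons]
    rw [ih, deg_step_getD]
    by_cases h : e.1 = v ∨ e.2 = v
    · rw [if_pos h]
      simp only [h, decide_true]
      push_cast
      ring
    · rw [if_neg h]
      simp only [h, decide_false]
      push_cast
      ring

theorem deg_fold_keys_nodup (l : List (Int × Int)) (d : PySem.Dict Int Int) (h : d.keys.Nodup) :
    (l.foldl deg_step d).keys.Nodup := by
  induction l generalizing d with
  | nil => exact h
  | cons e l ih =>
    simp only [List.foldl_cons]
    refine ih _ ?_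
    unfold deg_step
    by_cases h12 : (e.1 != e.2) = true
    · rw [if_pos h12]
      exact PySem.Dict.nodup_keys_insert _ _ _ (PySem.Dict.nodup_keys_insert _ _ _ h)
    · rw [if_neg h12]
      exact PySem.Dict.nodup_keys_insert _ _ _ h

-- two Nodup key lists agree on a countP when the predicate forces membership in both
theorem countP_eq_of_mem (p : Int → Bool) (l1 l2 : List Int) (h1 : l1.Nodup) (h2 : l2.Nodup)
    (h : ∀ v, p v = true → (v ∈ l1 ↔ v ∈ l2)) : l1.countP p = l2.countP p := by
  rw [List.countP_eq_length_filter, List.countP_eq_length_filter]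
  refine List.Perm.length_eq ?_
  rw [List.perm_ext_iff_of_nodup (h1.filter p) (h2.filter p)]
  intro a
  simp only [List.mem_filter]
  constructor
  · rintro ⟨ha, hp⟩; exact ⟨(h a hp).mp ha, hp⟩
  · rintro ⟨ha, hp⟩; exact ⟨(h a hp).mpr ha, hp⟩

-- ===== VERDICT (by name: the statement is the Claim_ definition above) =====
theorem count_odd_degree_nodes_spec : Claim_equal_count_odd_degree_nodes := by
  intro graph _
  unfold Spec_count_odd_degree_nodes count_odd_degree_nodes count_odd_degree_nodes_alt make_undirected
  have hInv0 : InvA PySem.Dict.empty PySem.Dict.empty := by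
    refine ⟨by simp [PySem.Dict.empty, PySem.Dict.keys], rfl, ?_, ?_⟩ <;> intro k <;>
      simp [PySem.Dict.keys, PySem.Dict.empty, PySem.Dict.getD, PySem.Dict.get?]
  obtain ⟨hInv, heq⟩ := outer_fold graph PySem.Dict.empty PySem.Dict.empty hInv0
  obtain ⟨hn, -, -, hc⟩ := hInv
  simp only []
  rw [heq] at hn hc ⊢
  rw [count_eq _ hn hc]
  -- names for the three structures
  set adj := graph.foldl adj_outer (PySem.Dict.empty : PySem.Dict Int (PySem.Set Int)) with hadj
  set E := graph.foldl edges_outer (PySem.Set.empty : PySem.Set (Int × Int)) with hE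
  set deg := E.foldl deg_step (PySem.Dict.empty : PySem.Dict Int Int) with hdeg
  have hadj_nodup : ∀ x : Int, (adj.getD x PySem.Set.empty).Nodup := by
    refine adj_nodup graph _ ?_
    intro x
    simp [PySem.Dict.getD_of_not_contains _ _ (by simp [PySem.Dict.contains, PySem.Dict.empty] : (PySem.Dict.empty : PySem.Dict Int (PySem.Set Int)).contains x = false)]
  have hE_nodup : E.Nodup := nodup_edges graph _ List.nodup_nil
  -- membership bridge: b is a recorded neighbor of v iff the canonical edge (v,b) was collected
  have hkey : ∀ v b : Int, b ∈ adj.getD v PySem.Set.empty ↔ canon v b ∈ E := by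
    intro v b
    rw [hadj, adj_mem, hE, mem_edges]
    have hempty1 : ((PySem.Dict.empty : PySem.Dict Int (PySem.Set Int)).getD v PySem.Set.empty) = PySem.Set.empty :=
      PySem.Dict.getD_of_not_contains _ _ (by simp [PySem.Dict.contains, PySem.Dict.empty])
    rw [hempty1]
    simp only [PySem.Set.empty, List.not_mem_nil, false_or]
    constructor
    · rintro ⟨p, hp, ⟨rfl, hb⟩ | ⟨rfl, ha⟩⟩
      · exact ⟨p, hp, b, hb, rfl⟩
      · exact ⟨p, hp, v, ha, by rw [canon_eq_iff]; right; exact ⟨rfl, rfl⟩⟩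
    · rintro ⟨p, hp, c, hc', heqc⟩
      rw [canon_eq_iff] at heqc
      rcases heqc with ⟨rfl, rfl⟩ | ⟨rfl, rfl⟩
      · exact ⟨p, hp, Or.inl ⟨rfl, hc'⟩⟩
      · exact ⟨p, hp, Or.inr ⟨rfl, hc'⟩⟩
  have hE_canon : ∀ x ∈ E, x.1 ≤ x.2 := by
    intro x hx
    rw [hE, mem_edges] at hx
    rcases hx with hx | ⟨p, _, b, _, rfl⟩
    · simp [PySem.Set.empty] at hx
    · rw [canon_minmax]; exact min_le_max
  -- each node's degree = the size of its recorded neighbor set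
  have hdeg_len : ∀ v : Int, deg.getD v 0 = ((adj.getD v PySem.Set.empty).length : Int) := by
    intro v
    rw [hdeg, deg_fold_getD]
    rw [PySem.Dict.getD_of_not_contains _ _ (by simp [PySem.Dict.contains, PySem.Dict.empty] : (PySem.Dict.empty : PySem.Dict Int Int).contains v = false)]
    rw [zero_add, List.countP_eq_length_filter]
    congr 1
    have hmemiff : ∀ x : Int × Int,
        x ∈ E.filter (fun e => decide (e.1 = v ∨ e.2 = v)) ↔
        x ∈ (adj.getD v PySem.Set.empty).map (fun b => canon v b) := by
      intro x
      rw [List.mem_filter, List.mem_map]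
      constructor
      · rintro ⟨hxE, hxv⟩
        have hle : x.1 ≤ x.2 := hE_canon x hxE
        rcases (by simpa using hxv : x.1 = v ∨ x.2 = v) with h1 | h2
        · refine ⟨x.2, ?_, ?_⟩
          · rw [hkey]
            have : canon v x.2 = x := by
              rw [canon_minmax]
              have : min v x.2 = v ∧ max v x.2 = x.2 := by omega
              rw [this.1, this.2, ← h1]
            rw [this]; exact hxE
          · rw [canon_minmax]
            have : min v x.2 = v ∧ max v x.2 = x.2 := by omega
            rw [this.1, this.2, ← h1]
        · refine ⟨x.1, ?_, ?_⟩
          · rw [hkey]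
            have : canon v x.1 = x := by
              rw [canon_minmax]
              have : min v x.1 = x.1 ∧ max v x.1 = v := by omega
              rw [this.1, this.2, ← h2]
            rw [this]; exact hxE
          · rw [canon_minmax]
            have : min v x.1 = x.1 ∧ max v x.1 = v := by omega
            rw [this.1, this.2, ← h2]
      · rintro ⟨b, hb, rfl⟩
        refine ⟨(hkey v b).mp hb, ?_⟩
        rw [canon_minmax]
        simp only [decide_eq_true_eq]
        omega
    have hperm : (E.filter (fun e => decide (e.1 = v ∨ e.2 = v))).Perm
        ((adj.getD v PySem.Set.empty).map (fun b => canon v b)) := by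
      rw [List.perm_ext_iff_of_nodup (hE_nodup.filter _) ((hadj_nodup v).map (canon_inj v))]
      exact hmemiff
    rw [hperm.length_eq, List.length_map]
  -- B's final loop = a countP over deg's keys
  have hdeg_keys_nodup : deg.keys.Nodup := by
    rw [hdeg]
    exact deg_fold_keys_nodup _ _ (by simp [PySem.Dict.keys, PySem.Dict.empty])
  rw [PySem.List.foldl_count_if]
  rw [PySem.Dict.values_eq_map_keys deg hdeg_keys_nodup 0, List.countP_map]
  -- swap B's Int-parity predicate for A's Nat-parity predicate using hdeg_len
  have hBpred : List.countP ((fun d => d % 2 != 0) ∘ fun k => deg.getD k 0) deg.keys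
      = List.countP (fun node => (adj.getD node PySem.Set.empty).length % 2 != 0) deg.keys := by
    apply List.countP_congr
    intro a _
    simp only [Function.comp, hdeg_len a]
    constructor <;> intro h <;> simp only [bne_iff_ne, ne_eq] at h ⊢ <;> omega
  rw [hBpred, zero_add]
  -- transfer the countP from adj's key list to deg's key list
  simp only [PySem.Set.empty]
  simp only [PySem.Set.empty] at hdeg_len
  congr 1
  refine countP_eq_of_mem _ _ _ hn hdeg_keys_nodup ?_
  intro v hv
  have hne : adj.getD v ([] : List Int) ≠ [] := by
    intro hnil
    rw [hnil] at hv
    simp at hv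
  have hmem1 : v ∈ adj.keys := by
    by_contra hnk
    refine hne (PySem.Dict.getD_of_not_contains _ _ ?_)
    cases hcv : adj.contains v with
    | false => rfl
    | true => exact absurd ((PySem.Dict.contains_iff_mem_keys adj v).mp hcv) hnk
  have hmem2 : v ∈ deg.keys := by
    by_contra hnk
    have h0 : deg.getD v 0 = 0 := by
      refine PySem.Dict.getD_of_not_contains _ _ ?_
      cases hcv : deg.contains v with
      | false => rfl
      | true => exact absurd ((PySem.Dict.contains_iff_mem_keys deg v).mp hcv) hnk
    rw [hdeg_len v] at h0
    have : adj.getD v ([] : List Int) = [] := List.length_eq_zero_iff.mp (by exact_mod_cast h0)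
    exact hne this
  exact ⟨fun _ => hmem2, fun _ => hmem1⟩
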